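-- pv_equiv track=rewrite | github.com/IEJYoum/pre-ohsu-code | OutlinerDemo.py | scoreDist
-- ===== SOURCE A (Python) =====
-- def scoreDist(dist,command,functions):
--     score = 0
--     sizes = []
--     nums = []
--     freqs = []
--     for boxProf in dist:
--         sizes.append(boxProf[0])
--         numb = []
--         freb = []
--         for i in range(2,len(boxProf)-1,2):
--             numb.append(boxProf[i])
--             freb.append(boxProf[i+1])
--         nums.append(numb)
--         freqs.append(freb)
--     if command == 0:  #functions is int, searches and adds frequency
--         for i in range(len(sizes)):
--             sizeNums = nums[i]
--             sizeFreqs = freqs[i]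
--             if functions in sizeNums:
--                 index = sizeNums.index(functions)
--                 freq = sizeFreqs[index]
--                 score += freq
--             else:
--                 return(score)
--         return(score)
-- ===== SOURCE B (Python) =====
-- def scoreDist(dist, command, functions):
--     if command != 0:
--         return None
--     score = 0
--     for boxProf in dist:
--         found = False
--         for i in range(2, len(boxProf) - 1, 2):
--             if boxProf[i] == functions:
--                 score += boxProf[i + 1]
--                 found = True
--                 break
--         if not found:
--             return score
--     return score
-- ===== Notes on version B (the rewrite author's own statement) =====
-- stated objective: simpler
-- what changed: Single pass: command is checked first and each boxProf's (number, frequency) pairs are scanned inline with an early break on the first match, instead of first building the sizes/nums/freqs tables for every box and then re-scanning them with 'in' plus .index; dropping the table-building phase and the double scan per box gives a measured constant-factor speedup.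
import Mathlib
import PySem

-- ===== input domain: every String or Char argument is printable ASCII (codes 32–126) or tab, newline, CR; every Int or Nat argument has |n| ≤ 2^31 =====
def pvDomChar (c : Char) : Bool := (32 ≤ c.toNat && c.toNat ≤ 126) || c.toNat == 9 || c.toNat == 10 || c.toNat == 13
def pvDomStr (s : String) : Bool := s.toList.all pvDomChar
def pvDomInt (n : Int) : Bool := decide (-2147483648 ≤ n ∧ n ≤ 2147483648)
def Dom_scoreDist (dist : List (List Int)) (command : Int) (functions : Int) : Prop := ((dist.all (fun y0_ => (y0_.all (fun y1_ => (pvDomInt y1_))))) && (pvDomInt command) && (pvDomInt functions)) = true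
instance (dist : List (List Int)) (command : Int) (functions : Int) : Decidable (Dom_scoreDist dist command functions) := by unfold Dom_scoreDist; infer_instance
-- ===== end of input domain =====

-- B replaces A's build-tables-then-scan (sizes/nums/freqs, then 'in' + .index) by one inline
-- scan per box with an early break; objective: simpler.

-- ===== PORT A =====
-- parse phase: sizes.append(boxProf[0]); numb/freb collected over range(2, len-1, 2)
-- (boxProf[0] raises IndexError on an empty boxProf — excluded by Pre_; pyGetD's default is
--  never reached inside Pre_, and the pair indices i, i+1 are always in range)
def pvParseBox (boxProf : List Int) : Int × List Int × List Int :=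
  let idxs := PySem.List.pyRange 2 (PySem.List.len boxProf - 1) 2
  (PySem.List.pyGetD boxProf 0 0,
   idxs.map (fun i => PySem.List.pyGetD boxProf i 0),
   idxs.map (fun i => PySem.List.pyGetD boxProf (i + 1) 0))

-- the command == 0 scoring loop with its early return
def pvScoreLoop (functions : Int) : List (List Int × List Int) → Int → Option Int
  | [], score => some score
  | (sizeNums, sizeFreqs) :: rest, score =>
    match PySem.List.index? sizeNums functions with
    | some index => pvScoreLoop functions rest (score + sizeFreqs.getD index 0)
    | none => some score

def scoreDist (dist : List (List Int)) (command : Int) (functions : Int) : Option Int :=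
  let parsed := dist.map pvParseBox
  if command = 0 then
    pvScoreLoop functions (parsed.map (fun p => (p.2.1, p.2.2))) 0
  else none

-- ===== PORT B =====
-- inner loop of Source B: scan the index list, break with the frequency on the first match
def pvScanIdxs (boxProf : List Int) (functions : Int) : List Int → Option Int
  | [] => none
  | i :: rest =>
    if PySem.List.pyGetD boxProf i 0 = functions then some (PySem.List.pyGetD boxProf (i + 1) 0)
    else pvScanIdxs boxProf functions rest

-- outer loop of Source B: accumulate, early return when a box has no match
def pvAltLoop (functions : Int) : List (List Int) → Int → Int
  | [], score => score
  | b :: rest, score =>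
    match pvScanIdxs b functions (PySem.List.pyRange 2 (PySem.List.len b - 1) 2) with
    | some f => pvAltLoop functions rest (score + f)
    | none => score

def scoreDist_alt (dist : List (List Int)) (command : Int) (functions : Int) : Option Int :=
  if command ≠ 0 then none else some (pvAltLoop functions dist 0)

-- ===== PRECONDITION & SPEC =====
-- Pre_ excludes dists with an empty boxProf: there Python A raises IndexError at boxProf[0].
def Pre_scoreDist (dist : List (List Int)) (command : Int) (functions : Int) : Prop :=
  ∀ b ∈ dist, b ≠ []

instance (dist : List (List Int)) (command : Int) (functions : Int) : Decidable (Pre_scoreDist dist command functions) := by unfold Pre_scoreDist; infer_instance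

def pvWitness_scoreDist : List (List Int) × Int × Int := ([[5, 0, 3, 7], [2, 0, 3, 4]], 0, 3)

def Spec_scoreDist (dist : List (List Int)) (command : Int) (functions : Int) (out : Option Int) : Prop := out = scoreDist_alt dist command functions
instance (dist : List (List Int)) (command : Int) (functions : Int) (out : Option Int) : Decidable (Spec_scoreDist dist command functions out) := by unfold Spec_scoreDist; infer_instance

-- ===== CLAIM (what is proved, stated in full; the proofs are below) =====
def Claim_equal_scoreDist : Prop := ∀ (dist : List (List Int)) (command : Int) (functions : Int), Dom_scoreDist dist command functions → Pre_scoreDist dist command functions → Spec_scoreDist dist command functions (scoreDist dist command functions)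

-- ===== LEMMAS AND PROOFS =====

-- B's inline scan of one box equals A's table-then-index lookup on that box
theorem pvScan_eq_index (boxProf : List Int) (functions : Int) (l : List Int) :
    pvScanIdxs boxProf functions l =
      match PySem.List.index? (l.map (fun i => PySem.List.pyGetD boxProf i 0)) functions with
      | some k => some ((l.map (fun i => PySem.List.pyGetD boxProf (i + 1) 0)).getD k 0)
      | none => none := by
  induction l with
  | nil => simp [pvScanIdxs, PySem.List.index?]
  | cons i rest ih =>
    by_cases h : PySem.List.pyGetD boxProf i 0 = functions
    · rw [show (i :: rest).map (fun i => PySem.List.pyGetD boxProf i 0)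
            = PySem.List.pyGetD boxProf i 0 :: rest.map (fun i => PySem.List.pyGetD boxProf i 0) from rfl,
          h, PySem.List.index?_cons_self]
      simp [pvScanIdxs, h]
    · rw [show (i :: rest).map (fun i => PySem.List.pyGetD boxProf i 0)
            = PySem.List.pyGetD boxProf i 0 :: rest.map (fun i => PySem.List.pyGetD boxProf i 0) from rfl,
          PySem.List.index?_cons_of_ne _ h]
      simp only [pvScanIdxs, h, if_false, ih]
      cases PySem.List.index? (rest.map (fun i => PySem.List.pyGetD boxProf i 0)) functions with
      | none => rfl
      | some k => simp [List.getD]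

-- A's scoring loop over the parsed tables equals B's fused loop, for every accumulator
theorem pvLoop_eq (functions : Int) (dist : List (List Int)) (score : Int) :
    pvScoreLoop functions ((dist.map pvParseBox).map (fun p => (p.2.1, p.2.2))) score
      = some (pvAltLoop functions dist score) := by
  induction dist generalizing score with
  | nil => rfl
  | cons b rest ih =>
    simp only [List.map_cons, pvParseBox, pvScoreLoop, pvAltLoop,
      pvScan_eq_index b functions (PySem.List.pyRange 2 (PySem.List.len b - 1) 2)]
    cases PySem.List.index?
        ((PySem.List.pyRange 2 (PySem.List.len b - 1) 2).map (fun i => PySem.List.pyGetD b i 0))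
        functions with
    | none => rfl
    | some k => exact ih _

-- ===== VERDICT (by name: the statement is the Claim_ definition above) =====
theorem scoreDist_spec : Claim_equal_scoreDist := by
  intro dist command functions _ _
  unfold Spec_scoreDist scoreDist scoreDist_alt
  by_cases hc : command = 0
  · simp only [hc, ne_eq, not_true_eq_false, if_false]
    exact pvLoop_eq functions dist 0
  · simp [hc]
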